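-- pv_equiv track=rewrite | github.com/tom-howes/otto-fresh | ingest-service/src/validation/bias_detection.py | _slice_by_chunk_size
-- ===== SOURCE A (Python) =====
-- def _slice_by_chunk_size(chunks):
--     slices = {"small": [], "medium": [], "large": []}
--     for c in chunks:
--         size = len(c.get("content", ""))
--         if size < 200:
--             slices["small"].append(c)
--         elif size < 1000:
--             slices["medium"].append(c)
--         else:
--             slices["large"].append(c)
--     return slices
-- ===== SOURCE B (Python) =====
-- def _slice_by_chunk_size(chunks):
--     # Three independent filtering comprehensions, one per bucket, instead of
--     # one branching loop that appends into a pre-built dict.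
--     return {
--         "small": [c for c in chunks if len(c.get("content", "")) < 200],
--         "medium": [c for c in chunks if 200 <= len(c.get("content", "")) < 1000],
--         "large": [c for c in chunks if len(c.get("content", "")) >= 1000],
--     }
-- ===== Notes on version B (the rewrite author's own statement) =====
-- stated objective: idiomatic
-- what changed: Replaces the single branching loop that appends into a mutable three-bucket dict with three independent list-comprehension filters, one per bucket, assembled directly into the returned dict literal.
import Mathlib
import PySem

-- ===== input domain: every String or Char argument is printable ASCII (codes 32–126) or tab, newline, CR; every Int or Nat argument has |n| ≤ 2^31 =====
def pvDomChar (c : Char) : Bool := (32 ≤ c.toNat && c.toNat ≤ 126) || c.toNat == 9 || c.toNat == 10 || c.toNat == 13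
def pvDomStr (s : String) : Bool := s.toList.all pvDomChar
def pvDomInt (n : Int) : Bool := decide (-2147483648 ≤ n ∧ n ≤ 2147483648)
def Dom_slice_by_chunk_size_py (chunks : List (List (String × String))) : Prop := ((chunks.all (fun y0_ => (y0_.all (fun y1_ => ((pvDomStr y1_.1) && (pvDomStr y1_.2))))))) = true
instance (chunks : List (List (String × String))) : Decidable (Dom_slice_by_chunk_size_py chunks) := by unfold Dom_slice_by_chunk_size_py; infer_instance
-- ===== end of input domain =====

-- B replaces A's single branching loop over a mutable three-bucket dict with three
-- independent filter passes (one comprehension per bucket); same values, idiomatic form.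

-- ===== PORT A =====
-- size = len(c.get("content", ""))
def pvChunkSize (c : List (String × String)) : Int :=
  PySem.Str.len ((PySem.Dict.mk c).getD "content" "")

-- the loop body: append c to the bucket chosen by the if/elif/else chain
def pvStepA (d : PySem.Dict String (List (List (String × String)))) (c : List (String × String)) :
    PySem.Dict String (List (List (String × String))) :=
  let size := pvChunkSize c
  if size < 200 then d.modify "small" [] (· ++ [c])
  else if size < 1000 then d.modify "medium" [] (· ++ [c])
  else d.modify "large" [] (· ++ [c])

def slice_by_chunk_size_py (chunks : List (List (String × String))) : List (String × List (List (String × String))) :=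
  (chunks.foldl pvStepA
    (((PySem.Dict.empty.insert "small" []).insert "medium" []).insert "large" [])).items

-- ===== PORT B =====
def slice_by_chunk_size_py_alt (chunks : List (List (String × String))) : List (String × List (List (String × String))) :=
  [("small",  chunks.filter (fun c => decide (pvChunkSize c < 200))),
   ("medium", chunks.filter (fun c => decide (200 ≤ pvChunkSize c) && decide (pvChunkSize c < 1000))),
   ("large",  chunks.filter (fun c => decide (1000 ≤ pvChunkSize c)))]

-- ===== PRECONDITION & SPEC =====
def Spec_slice_by_chunk_size_py (chunks : List (List (String × String))) (out : List (String × List (List (String × String)))) : Prop := out = slice_by_chunk_size_py_alt chunks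
instance (chunks : List (List (String × String))) (out : List (String × List (List (String × String)))) : Decidable (Spec_slice_by_chunk_size_py chunks out) := by unfold Spec_slice_by_chunk_size_py; infer_instance

-- ===== CLAIM (what is proved, stated in full; the proofs are below) =====
def Claim_equal_slice_by_chunk_size_py : Prop := ∀ (chunks : List (List (String × String))), Dom_slice_by_chunk_size_py chunks → Spec_slice_by_chunk_size_py chunks (slice_by_chunk_size_py chunks)

-- ===== LEMMAS AND PROOFS =====

-- loop invariant: folding A's step over a dict holding the three buckets appends exactly the filters
theorem pv_foldl_inv (chunks : List (List (String × String)))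
    (s m l : List (List (String × String))) :
    (chunks.foldl pvStepA (PySem.Dict.mk [("small", s), ("medium", m), ("large", l)])).items
      = [("small",  s ++ chunks.filter (fun c => decide (pvChunkSize c < 200))),
         ("medium", m ++ chunks.filter (fun c => decide (200 ≤ pvChunkSize c) && decide (pvChunkSize c < 1000))),
         ("large",  l ++ chunks.filter (fun c => decide (1000 ≤ pvChunkSize c)))] := by
  induction chunks generalizing s m l with
  | nil => simp
  | cons c t ih =>
    by_cases h1 : pvChunkSize c < 200
    · have hstep : pvStepA (PySem.Dict.mk [("small", s), ("medium", m), ("large", l)]) c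
          = PySem.Dict.mk [("small", s ++ [c]), ("medium", m), ("large", l)] := by
        simp [pvStepA, h1, PySem.Dict.modify, PySem.Dict.getD, PySem.Dict.get?, PySem.Dict.insert, PySem.Dict.contains]
      have hA : ¬ (200 ≤ pvChunkSize c) := by omega
      have hB : ¬ (1000 ≤ pvChunkSize c) := by omega
      simp only [List.foldl_cons, hstep, ih, List.filter_cons]
      simp [h1, hA, hB]
    · by_cases h2 : pvChunkSize c < 1000
      · have hstep : pvStepA (PySem.Dict.mk [("small", s), ("medium", m), ("large", l)]) c
            = PySem.Dict.mk [("small", s), ("medium", m ++ [c]), ("large", l)] := by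
          simp [pvStepA, h1, h2, PySem.Dict.modify, PySem.Dict.getD, PySem.Dict.get?, PySem.Dict.insert, PySem.Dict.contains]
        have hA : 200 ≤ pvChunkSize c := by omega
        have hB : ¬ (1000 ≤ pvChunkSize c) := by omega
        simp only [List.foldl_cons, hstep, ih, List.filter_cons]
        simp [h1, h2, hA, hB]
      · have hstep : pvStepA (PySem.Dict.mk [("small", s), ("medium", m), ("large", l)]) c
            = PySem.Dict.mk [("small", s), ("medium", m), ("large", l ++ [c])] := by
          simp [pvStepA, h1, h2, PySem.Dict.modify, PySem.Dict.getD, PySem.Dict.get?, PySem.Dict.insert, PySem.Dict.contains]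
        have hA : 1000 ≤ pvChunkSize c := by omega
        simp only [List.foldl_cons, hstep, ih, List.filter_cons]
        simp [h1, h2, hA]

-- ===== VERDICT (by name: the statement is the Claim_ definition above) =====
theorem slice_by_chunk_size_py_spec : Claim_equal_slice_by_chunk_size_py := by
  intro chunks _
  unfold Spec_slice_by_chunk_size_py slice_by_chunk_size_py slice_by_chunk_size_py_alt
  have hinit : (((PySem.Dict.empty.insert "small" ([] : List (List (String × String)))).insert "medium" []).insert "large" [])
      = PySem.Dict.mk [("small", []), ("medium", []), ("large", [])] := by rfl
  rw [hinit, pv_foldl_inv]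
  simp
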